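-- pv_equiv track=rewrite | github.com/mikebochenek/learning | python3/projecteuler_2.py | f885
-- ===== SOURCE A (Python) =====
-- def f885(n):
--     if n <= 0:
--         return 0
--     s_n = str(n)
--     digits = []
--     for s in s_n: # kinda brute force
--         if (s != '0'):
--             digits.append(s)
--     digits.sort()
--     s_n = ''.join(digits) # convert digits list into a string
--     return int(s_n) # return integer     # print (digits, s_n)
-- ===== SOURCE B (Python) =====
-- def f885(n):
--     if n <= 0:
--         return 0
--     count = [0] * 10
--     for ch in str(n):
--         count[int(ch)] += 1
--     parts = []
--     for d in range(1, 10):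
--         parts.append(str(d) * count[d])
--     return int(''.join(parts))
-- ===== Notes on version B (the rewrite author's own statement) =====
-- stated objective: alternative
-- what changed: Replaces A's filter-then-comparison-sort of the digit characters with a counting sort: one pass tallies the digits of str(n) into a fixed count table, then the result is rebuilt by emitting each nonzero digit value, in increasing order, as many times as it was counted.
import Mathlib
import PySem

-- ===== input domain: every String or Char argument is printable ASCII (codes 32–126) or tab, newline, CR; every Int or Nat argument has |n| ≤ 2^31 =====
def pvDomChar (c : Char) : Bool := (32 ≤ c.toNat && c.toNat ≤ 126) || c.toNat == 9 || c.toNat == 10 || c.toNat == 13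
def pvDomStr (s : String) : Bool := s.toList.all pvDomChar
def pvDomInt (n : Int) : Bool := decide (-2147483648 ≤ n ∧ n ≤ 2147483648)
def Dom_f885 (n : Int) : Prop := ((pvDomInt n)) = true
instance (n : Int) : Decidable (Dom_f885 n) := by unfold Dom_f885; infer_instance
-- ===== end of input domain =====

-- B replaces A's filter + comparison sort of the digit characters by a single counting pass into a
-- 10-slot table plus a value-ordered reconstruction over the digits 1..9 (a counting sort); same
-- return value for every int (objective: alternative).

-- ===== PORT A =====
-- int(''.join(digits)) can only raise for an empty digit list, which n > 0 rules out
-- (str(n) starts with a nonzero digit); the `.getD 0` is that unreachable none-case.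
def f885 (n : Int) : Int :=
  if n ≤ 0 then 0
  else
    let s_n := PySem.Int.toChars n
    let digits := s_n.foldl (fun acc s => if s ≠ '0' then acc ++ [s] else acc) ([] : List Char)
    let digits := PySem.List.sorted digits (fun x => x) false
    (PySem.Int.ofChars? digits).getD 0

-- ===== PORT B =====
-- loop body of `count[int(ch)] += 1`: int(ch) is a digit value 0..9 here, so the IndexError
-- branch of Python's list indexing is unreachable; `.getD`/`.toNat` sit on that unreachable case.
def pvCountStep (c : List Int) (ch : Char) : List Int :=
  let i := ((PySem.Int.ofChars? [ch]).getD 0).toNat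
  c.set i (PySem.List.pyGetD c (i : Int) 0 + 1)

def f885_alt (n : Int) : Int :=
  if n ≤ 0 then 0
  else
    let cs := PySem.Int.toChars n
    let count := cs.foldl pvCountStep (List.replicate 10 (0 : Int))
    let parts := (PySem.List.pyRange 1 10 1).foldl
      (fun acc d => acc ++ [PySem.List.pyRepeat (PySem.Int.toChars d) (PySem.List.pyGetD count d 0)])
      ([] : List (List Char))
    (PySem.Int.ofChars? parts.flatten).getD 0

-- ===== PRECONDITION & SPEC =====
def Spec_f885 (n : Int) (out : Int) : Prop := out = f885_alt n
instance (n : Int) (out : Int) : Decidable (Spec_f885 n out) := by unfold Spec_f885; infer_instance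

-- ===== CLAIM (what is proved, stated in full; the proofs are below) =====
def Claim_equal_f885 : Prop := ∀ (n : Int), Dom_f885 n → Spec_f885 n (f885 n)

-- ===== LEMMAS AND PROOFS =====

/-- "c is a decimal digit character". -/
def pvIsDig (c : Char) : Prop := ∃ d, d < 10 ∧ c = Nat.digitChar d

lemma toDigitsCore_digits (f : Nat) : ∀ (n : Nat) (acc : List Char),
    (∀ c ∈ acc, pvIsDig c) → ∀ c ∈ Nat.toDigitsCore 10 f n acc, pvIsDig c := by
  induction f with
  | zero => intro n acc hacc c hc; exact hacc c hc
  | succ f ih =>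
    intro n acc hacc c hc
    have hd : pvIsDig ((n % 10).digitChar) := ⟨n % 10, Nat.mod_lt _ (by norm_num), rfl⟩
    have hacc' : ∀ x ∈ (n % 10).digitChar :: acc, pvIsDig x := by
      intro x hx
      rcases List.mem_cons.mp hx with h | h
      · exact h ▸ hd
      · exact hacc x h
    simp only [Nat.toDigitsCore] at hc
    split at hc
    · exact hacc' c hc
    · exact ih _ _ hacc' c hc

lemma toChars_digits (n : Int) (hn : 0 < n) : ∀ c ∈ PySem.Int.toChars n, pvIsDig c := by
  have h : PySem.Int.toChars n = Nat.toDigits 10 n.toNat := by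
    simp [PySem.Int.toChars, not_lt.mpr (le_of_lt hn)]
  rw [h, Nat.toDigits]
  exact toDigitsCore_digits _ _ _ (by simp)

lemma pvCountStep_digitChar (c : List Int) (e : Nat) (he : e < 10) :
    pvCountStep c (Nat.digitChar e) = c.set e (PySem.List.pyGetD c (e : Int) 0 + 1) := by
  have hi : ((PySem.Int.ofChars? [Nat.digitChar e]).getD 0) = (e : Int) := by
    interval_cases e <;> decide
  simp [pvCountStep, hi]

lemma digitChar_inj_lt10 : ∀ e < 10, ∀ d < 10, (Nat.digitChar e = Nat.digitChar d) ↔ e = d := by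
  decide

lemma count_fold_inv (cs : List Char) : ∀ (c0 : List Int),
    (∀ c ∈ cs, pvIsDig c) → c0.length = 10 →
    (cs.foldl pvCountStep c0).length = 10 ∧
    ∀ d < 10, (cs.foldl pvCountStep c0).getD d 0
      = c0.getD d 0 + (cs.count (Nat.digitChar d) : Int) := by
  induction cs with
  | nil => intro c0 _ hlen; exact ⟨hlen, by simp⟩
  | cons ch t ih =>
    intro c0 hdig hlen
    obtain ⟨e, he, rfl⟩ := hdig _ (List.mem_cons_self)
    rw [List.foldl_cons, pvCountStep_digitChar c0 e he,
      PySem.List.pyGetD_natCast]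
    have hlen' : (c0.set e (c0.getD e 0 + 1)).length = 10 := by simp [hlen]
    obtain ⟨l1, l2⟩ := ih _ (fun c hc => hdig c (List.mem_cons_of_mem _ hc)) hlen'
    refine ⟨l1, fun d hd => ?_⟩
    rw [l2 d hd]
    by_cases hed : e = d
    · subst hed
      rw [List.count_cons_self]
      have hset : (c0.set e (c0.getD e 0 + 1)).getD e 0 = c0.getD e 0 + 1 := by
        simp [List.getD_eq_getElem?_getD, hlen, he]
      rw [hset]; push_cast; ring
    · have hne : (Nat.digitChar e == Nat.digitChar d) = false := by
        simp only [beq_eq_false_iff_ne, ne_eq]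
        intro h; exact hed ((digitChar_inj_lt10 e he d hd).mp h)
      rw [List.count_cons, hne]
      have hset : (c0.set e (c0.getD e 0 + 1)).getD d 0 = c0.getD d 0 := by
        simp [List.getD_eq_getElem?_getD, hed]
      rw [hset]; simp

/-- one block of the counting-sort output: count(digit d) copies of digit d's character -/
def pvRep (cs : List Char) (d : Nat) : List Char :=
  List.replicate (cs.count (Nat.digitChar d)) (Nat.digitChar d)

/-- the counting-sort reconstruction of cs's nonzero digits, smallest digit first -/
def pvTarget (cs : List Char) : List Char :=
  pvRep cs 1 ++ pvRep cs 2 ++ pvRep cs 3 ++ pvRep cs 4 ++ pvRep cs 5 ++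
  pvRep cs 6 ++ pvRep cs 7 ++ pvRep cs 8 ++ pvRep cs 9

lemma pvTarget_perm (cs : List Char) (hdig : ∀ c ∈ cs, pvIsDig c) :
    (pvTarget cs).Perm (cs.filter (fun c => decide (c ≠ '0'))) := by
  rw [List.perm_iff_count]
  intro a
  by_cases hm : a ∈ cs
  · obtain ⟨e, he, rfl⟩ := hdig a hm
    interval_cases e
    · -- the zero digit: both sides count '0', which the filter and the reconstruction both drop
      simp [pvTarget, pvRep, List.count_append, List.count_replicate, Nat.digitChar, Char.ext_iff]
      rw [List.count_eq_zero.mpr (by simp)]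
    all_goals
      simp [pvTarget, pvRep, List.count_append, List.count_replicate, List.count_filter,
        Nat.digitChar, Char.ext_iff]
  · have h1 : cs.count a = 0 := List.count_eq_zero.mpr hm
    have h2 : (cs.filter (fun c => decide (c ≠ '0'))).count a = 0 :=
      List.count_eq_zero.mpr (fun h => hm (List.mem_of_mem_filter h))
    rw [h2]
    have hz : ∀ j : Nat, (if Nat.digitChar j = a then List.count (Nat.digitChar j) cs else 0) = 0 := by
      intro j; split_ifs with h
      · rw [h]; exact h1
      · rfl
    simp only [pvTarget, pvRep, List.count_append, List.count_replicate, beq_iff_eq]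
    rw [hz 1, hz 2, hz 3, hz 4, hz 5, hz 6, hz 7, hz 8, hz 9]

lemma digitChar_mono : ∀ i < 10, ∀ j < 10, i ≤ j → Nat.digitChar i ≤ Nat.digitChar j := by
  decide

lemma pairwise_flatten_reps (cs : List Char) (ds : List Nat) :
    ds.Pairwise (· < ·) → (∀ d ∈ ds, d < 10) →
    ((ds.map (fun d => pvRep cs d)).flatten).Pairwise (fun a b => a ≤ b) := by
  induction ds with
  | nil => simp
  | cons d t ih =>
    intro hp hlt
    rw [List.map_cons, List.flatten_cons]
    refine List.pairwise_append.mpr ⟨?_, ?_, ?_⟩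
    · exact List.pairwise_replicate.mpr (Or.inr (le_refl _))
    · exact ih hp.of_cons (fun x hx => hlt x (List.mem_cons_of_mem _ hx))
    · intro a ha b hb
      obtain rfl := List.eq_of_mem_replicate ha
      obtain ⟨l, hl, hbl⟩ := List.mem_flatten.mp hb
      obtain ⟨d', hd', rfl⟩ := List.mem_map.mp hl
      obtain rfl := List.eq_of_mem_replicate hbl
      have h1 : d < d' := (List.pairwise_cons.mp hp).1 d' hd'
      exact digitChar_mono d (hlt d List.mem_cons_self) d'
        (hlt d' (List.mem_cons_of_mem _ hd')) (le_of_lt h1)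

lemma pvTarget_pairwise (cs : List Char) :
    (pvTarget cs).Pairwise (fun a b => a ≤ b) := by
  have h : pvTarget cs
      = ((([1,2,3,4,5,6,7,8,9] : List Nat).map (fun d => pvRep cs d)).flatten) := by
    simp [pvTarget]
  rw [h]
  exact pairwise_flatten_reps cs _ (by decide) (by decide)

lemma flatten_eq_target (cs : List Char) (hdig : ∀ c ∈ cs, pvIsDig c) :
    (((PySem.List.pyRange 1 10 1).foldl
      (fun acc d => acc ++ [PySem.List.pyRepeat (PySem.Int.toChars d)
        (PySem.List.pyGetD (cs.foldl pvCountStep (List.replicate 10 (0:Int))) d 0)])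
      ([] : List (List Char))).flatten) = pvTarget cs := by
  obtain ⟨hlen, hval⟩ := count_fold_inv cs (List.replicate 10 0) hdig (by simp)
  rw [PySem.List.foldl_append_singleton_eq_map]
  have hrange : PySem.List.pyRange 1 10 1 = [1,2,3,4,5,6,7,8,9] := by decide
  rw [hrange]
  have hp : ∀ (d : Int) (e : Nat), d = (e : Int) → e < 10 →
      PySem.List.pyRepeat (PySem.Int.toChars d)
        (PySem.List.pyGetD (cs.foldl pvCountStep (List.replicate 10 (0:Int))) d 0) = pvRep cs e := by
    rintro d e rfl he
    have ht : PySem.Int.toChars (e : Int) = [Nat.digitChar e] := by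
      interval_cases e <;> rfl
    have h0 : (List.replicate 10 (0:Int)).getD e 0 = 0 := by
      interval_cases e <;> rfl
    rw [PySem.List.pyGetD_natCast, hval e he, h0, zero_add, ht,
      PySem.List.pyRepeat_singleton]
    simp [pvRep]
  simp only [List.map_cons, List.map_nil, List.nil_append]
  rw [hp 1 1 rfl (by norm_num), hp 2 2 rfl (by norm_num), hp 3 3 rfl (by norm_num),
    hp 4 4 rfl (by norm_num), hp 5 5 rfl (by norm_num), hp 6 6 rfl (by norm_num),
    hp 7 7 rfl (by norm_num), hp 8 8 rfl (by norm_num), hp 9 9 rfl (by norm_num)]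
  simp [pvTarget]

-- ===== VERDICT (by name: the statement is the Claim_ definition above) =====
theorem f885_spec : Claim_equal_f885 := by
  intro n _
  show f885 n = f885_alt n
  unfold f885 f885_alt
  by_cases hn : n ≤ 0
  · simp [hn]
  · have hn' : 0 < n := lt_of_not_ge hn
    simp only [if_neg hn]
    have hdig := toChars_digits n hn'
    rw [PySem.List.foldl_append_ite_eq_filter, List.nil_append,
      PySem.List.sorted_id_eq_of_perm_of_pairwise _ _ (pvTarget_perm _ hdig) (pvTarget_pairwise _),
      flatten_eq_target _ hdig]
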